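-- pv_equiv track=rewrite | github.com/Korentin-Cassou/Projets_d_informatique | Projets NSI/korentin.PlayConnectFinal.py | verticale
-- ===== SOURCE A (Python) =====
-- def verticale (tab, joueur, numberToAlign):
--
--     """
--         Cette fonction vérifie si le nombre de pions définis au départ par l'utilisateur sont alignés verticalement.
--         Pour chaque ligne, on vérifie tous les emplacements à vérifier définis dans numberOfPlacesToTest.
--
--         On retire numberToAlign à NumberOfPlacesLinesTest pour éviter de créer une erreur.
--         Par exemple, si l'on doit aligner 4 pions, et qu'on est à la 7e ligne sur 8 (en partant du bas), le programme tentera de vérifier les valeurs des 3 lignes au dessus de 7. Or les lignes au dessus de la 8e n'existent pas. On aura donc une erreur.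
--
--         On ajoute 1 à la variable car l'emplacement qu'on teste doit forcément avoir la valeur de joueur.
--         Par exemple, si on n'avait pas mis le +1: on choisit 4 pions, le programme détecterait que l'on a gagné seulement si on avait aligné 5 pions et non 4.
--
--         Si l'emplacement testé est égal à joueur, la boucle while vérifie que tous les nombre d'emplacement suivant verticalement définis dans numberToAlign (incluant l'emplacement testé lui-même) valent joueur.
--         Si c'est le cas, succesToAlign sera égal à numberToAlign, et la fonction renverra True.
--         Sinon, numberAligned et SuccessToAlign repasseront à 1 pour ne pas perturber la suite du programme, et la boucle for recommencera avec une autre valeur.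
--
--     """
--
--     numberAligned = 1
--     successToAlign = 1
--     numberOfLinesToTest = len(tab) - numberToAlign +1
--
--     # - numberToAlign car si on ne fait pas ça, Thonny vérifiera des valeurs out of range et affichera une erreur
--     # + 1 car si on ne fait pas ça, Thonny ne vériefiera pas le dernier emplacement vertical
--
--     numberOfPlacesToTest = len(tab[0])
--
--     for line in range (numberOfLinesToTest):
--
--         for place in range ( numberOfPlacesToTest ):
--
--             if tab[line][place] == joueur:
--
--                 while numberAligned != numberToAlign:
--
--                     # Système de compteur: par exemple, si on veut aligner 4 pions, la boucle compte dans les 4 emplacements suivants, le nombre de valeurs de joueur. S'il y en a 3 (celle de départ et les trois comptées), alors le joueur a gagné.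
--
--                     if tab[line + numberAligned][place] == joueur:
--
--                         successToAlign = successToAlign + 1
--
--                     numberAligned = numberAligned + 1
--
--                 if successToAlign == numberToAlign:
--
--                     return True
--
--                 numberAligned = 1
--                 successToAlign = 1
-- ===== SOURCE B (Python) =====
-- def verticale(tab, joueur, numberToAlign):
--     # Column-major single pass: a running consecutive-match counter per column
--     # replaces A's re-check of a K-cell vertical window below every matching cell.
--     for col in range(len(tab[0])):
--         run = 0
--         for row in tab:
--             if row[col] == joueur:
--                 run += 1
--                 if run >= numberToAlign:
--                     return True
--             else:
--                 run = 0
-- ===== Notes on version B (the rewrite author's own statement) =====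
-- stated objective: alternative
-- what changed: Replaced the row-major scan that re-checks a numberToAlign-cell vertical window below every matching cell with a single column-major pass keeping a running consecutive-match counter per column (avoids the window re-scan; not measurably faster on the benchmark inputs).
-- outside the precondition, e.g. on verticale([[6, 49, 8], [], [5]], 46, 10): A returns None, B raises IndexError; on verticale([[7, 7], [7]], 7, 2): A returns True, B returns True
import Mathlib
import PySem

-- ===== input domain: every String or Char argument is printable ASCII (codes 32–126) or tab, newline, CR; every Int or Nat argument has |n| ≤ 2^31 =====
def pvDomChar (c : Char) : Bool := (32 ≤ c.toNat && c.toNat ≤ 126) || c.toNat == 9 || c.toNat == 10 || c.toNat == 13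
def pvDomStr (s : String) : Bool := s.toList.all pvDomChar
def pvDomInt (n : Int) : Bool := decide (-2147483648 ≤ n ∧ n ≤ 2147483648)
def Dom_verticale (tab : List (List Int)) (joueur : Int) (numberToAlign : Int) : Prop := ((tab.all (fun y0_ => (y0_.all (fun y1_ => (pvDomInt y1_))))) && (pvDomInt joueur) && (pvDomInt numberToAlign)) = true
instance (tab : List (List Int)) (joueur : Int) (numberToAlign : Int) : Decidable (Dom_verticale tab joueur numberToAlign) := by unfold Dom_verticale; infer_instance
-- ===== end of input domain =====

-- B replaces A's row-major scan with its K-cell vertical window re-check by one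
-- column-major pass with a running consecutive-match counter (objective: alternative).

-- ===== PORT A =====
-- the 'while numberAligned != numberToAlign' loop: under Pre_ it runs exactly
-- (numberToAlign - numberAligned).toNat times, which is the fuel passed below
def vertWhile (tab : List (List Int)) (joueur : Int) (line place : Int) :
    Nat → Int → Int → Int × Int
  | 0, na, sa => (na, sa)
  | f + 1, na, sa =>
      vertWhile tab joueur line place f (na + 1)
        (if PySem.List.pyGetD (PySem.List.pyGetD tab (line + na) []) place 0 = joueur
         then sa + 1 else sa)

-- the inner 'for place in range(numberOfPlacesToTest)' loop; 'none' signals 'return True'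
def vertPlaces (tab : List (List Int)) (joueur numberToAlign line : Int) :
    List Int → Int → Int → Option (Int × Int)
  | [], na, sa => some (na, sa)
  | place :: rest, na, sa =>
      if PySem.List.pyGetD (PySem.List.pyGetD tab line []) place 0 = joueur then
        let r := vertWhile tab joueur line place (numberToAlign - na).toNat na sa
        if r.2 = numberToAlign then none
        else vertPlaces tab joueur numberToAlign line rest 1 1
      else vertPlaces tab joueur numberToAlign line rest na sa

-- the outer 'for line in range(numberOfLinesToTest)' loop
def vertLines (tab : List (List Int)) (joueur numberToAlign : Int) (places : List Int) :
    List Int → Int → Int → Option Bool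
  | [], _, _ => none
  | line :: rest, na, sa =>
      match vertPlaces tab joueur numberToAlign line places na sa with
      | none => some true
      | some (na', sa') => vertLines tab joueur numberToAlign places rest na' sa'

def verticale (tab : List (List Int)) (joueur : Int) (numberToAlign : Int) : Option Bool :=
  let numberOfLinesToTest : Int := (tab.length : Int) - numberToAlign + 1
  let numberOfPlacesToTest : Int := ((PySem.List.pyGetD tab 0 []).length : Int)
  vertLines tab joueur numberToAlign (PySem.List.pyRange 0 numberOfPlacesToTest 1)
    (PySem.List.pyRange 0 numberOfLinesToTest 1) 1 1

-- ===== PORT B =====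
-- the inner 'for row in tab' loop with the running counter 'run'; early 'return True'
def altColGo (joueur numberToAlign : Int) (col : Int) :
    List (List Int) → Int → Bool
  | [], _ => false
  | row :: rest, run =>
      if PySem.List.pyGetD row col 0 = joueur then
        if numberToAlign ≤ run + 1 then true
        else altColGo joueur numberToAlign col rest (run + 1)
      else altColGo joueur numberToAlign col rest 0

def verticale_alt (tab : List (List Int)) (joueur : Int) (numberToAlign : Int) : Option Bool :=
  if (PySem.List.pyRange 0 ((PySem.List.pyGetD tab 0 []).length : Int) 1).any
      (fun col => altColGo joueur numberToAlign col tab 0)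
  then some true else none

-- ===== PRECONDITION & SPEC =====
-- Pre_ excludes the empty grid (tab[0] is an IndexError in A) and numberToAlign < 1
-- (A's while loop overruns the grid, an IndexError), where A always raises; and
-- ragged grids with a row shorter than row 0, where whether A raises an IndexError or
-- returns is an accident of which cells its scan happens to reach, and B's column
-- scan naturally raises on a short row it reaches.
def Pre_verticale (tab : List (List Int)) (joueur : Int) (numberToAlign : Int) : Prop :=
  tab ≠ [] ∧ 1 ≤ numberToAlign ∧ ∀ row ∈ tab, (tab.headD []).length ≤ row.length
instance (tab : List (List Int)) (joueur : Int) (numberToAlign : Int) : Decidable (Pre_verticale tab joueur numberToAlign) := by unfold Pre_verticale; infer_instance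

def pvWitness_verticale : List (List Int) × Int × Int := ([[1, 0], [1, 2], [1, 0]], 1, 3)

def Spec_verticale (tab : List (List Int)) (joueur : Int) (numberToAlign : Int) (out : Option Bool) : Prop := out = verticale_alt tab joueur numberToAlign
instance (tab : List (List Int)) (joueur : Int) (numberToAlign : Int) (out : Option Bool) : Decidable (Spec_verticale tab joueur numberToAlign out) := by unfold Spec_verticale; infer_instance

-- ===== CLAIM (what is proved, stated in full; the proofs are below) =====
def Claim_equal_verticale : Prop := ∀ (tab : List (List Int)) (joueur : Int) (numberToAlign : Int), Dom_verticale tab joueur numberToAlign → Pre_verticale tab joueur numberToAlign → Spec_verticale tab joueur numberToAlign (verticale tab joueur numberToAlign)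

-- ===== LEMMAS AND PROOFS =====

-- A wins at (line, place): that cell and the numberToAlign-1 cells below it hold joueur
abbrev AWin (tab : List (List Int)) (joueur numberToAlign line place : Int) : Prop :=
  PySem.List.pyGetD (PySem.List.pyGetD tab line []) place 0 = joueur ∧
  ∀ d : Nat, d < (numberToAlign - 1).toNat →
    PySem.List.pyGetD (PySem.List.pyGetD tab (line + 1 + (d : Int)) []) place 0 = joueur

-- the common, index-free winning condition both programs decide
def Win (tab : List (List Int)) (joueur numberToAlign : Int) : Prop :=
  ∃ s c : Nat, c < (PySem.List.pyGetD tab 0 []).length ∧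
    s + numberToAlign.toNat ≤ tab.length ∧
    ∀ i : Nat, i < numberToAlign.toNat → (tab.getD (s + i) []).getD c 0 = joueur

lemma cell_cast (tab : List (List Int)) (r c : Nat) :
    PySem.List.pyGetD (PySem.List.pyGetD tab ((r : Nat) : Int) []) ((c : Nat) : Int) 0 =
      (tab.getD r []).getD c 0 := by
  rw [PySem.List.pyGetD_natCast, PySem.List.pyGetD_natCast]

lemma vertWhile_snd_le (tab : List (List Int)) (joueur line place : Int) :
    ∀ (f : Nat) (na sa : Int),
      (vertWhile tab joueur line place f na sa).2 ≤ sa + f := by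
  intro f
  induction f with
  | zero => intro na sa; simp [vertWhile]
  | succ f ih =>
      intro na sa
      simp only [vertWhile]
      split
      · have := ih (na + 1) (sa + 1); omega
      · have := ih (na + 1) sa; omega

lemma vertWhile_snd_eq_iff (tab : List (List Int)) (joueur line place : Int) :
    ∀ (f : Nat) (na sa : Int),
      (vertWhile tab joueur line place f na sa).2 = sa + f ↔
        ∀ d : Nat, d < f →
          PySem.List.pyGetD (PySem.List.pyGetD tab (line + na + (d : Int)) []) place 0 = joueur := by
  intro f
  induction f with
  | zero => intro na sa; simp [vertWhile]
  | succ f ih =>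
      intro na sa
      simp only [vertWhile]
      split
      · rename_i h
        have hiff := ih (na + 1) (sa + 1)
        constructor
        · intro he d hd
          cases d with
          | zero => simpa using h
          | succ d' =>
              have hall := hiff.1 (by omega) d' (by omega)
              have he2 : line + (na + 1) + (d' : Int) = line + na + ((d' + 1 : Nat) : Int) := by
                push_cast; ring
              rwa [he2] at hall
        · intro hall
          have h2 : ∀ d : Nat, d < f →
              PySem.List.pyGetD (PySem.List.pyGetD tab (line + (na + 1) + (d : Int)) []) place 0 = joueur := by
            intro d hd
            have h3 := hall (d + 1) (by omega)
            have he2 : line + na + ((d + 1 : Nat) : Int) = line + (na + 1) + (d : Int) := by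
              push_cast; ring
            rwa [he2] at h3
          have := hiff.2 h2
          omega
      · rename_i h
        constructor
        · intro he
          exfalso
          have hle := vertWhile_snd_le tab joueur line place f (na + 1) sa
          omega
        · intro hall
          exact absurd (by simpa using hall 0 (by omega)) h

lemma vertPlaces_spec (tab : List (List Int)) (joueur numberToAlign line : Int)
    (hK : 1 ≤ numberToAlign) :
    ∀ places : List Int,
      vertPlaces tab joueur numberToAlign line places 1 1 =
        if ∃ p ∈ places, AWin tab joueur numberToAlign line p then none else some (1, 1) := by
  intro places
  induction places with
  | nil => simp [vertPlaces]
  | cons p rest ih =>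
      simp only [vertPlaces]
      have hfuel : (((numberToAlign - 1).toNat : Nat) : Int) = numberToAlign - 1 :=
        Int.toNat_of_nonneg (by omega)
      by_cases hc : PySem.List.pyGetD (PySem.List.pyGetD tab line []) p 0 = joueur
      · rw [if_pos hc]
        have hiff := vertWhile_snd_eq_iff tab joueur line p (numberToAlign - 1).toNat 1 1
        by_cases hw : ∀ d : Nat, d < (numberToAlign - 1).toNat →
            PySem.List.pyGetD (PySem.List.pyGetD tab (line + 1 + (d : Int)) []) p 0 = joueur
        · have heq : (vertWhile tab joueur line p (numberToAlign - 1).toNat 1 1).2 = numberToAlign := by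
            rw [hiff.2 hw]; omega
          rw [if_pos heq, if_pos ⟨p, by simp, hc, hw⟩]
        · have hne : (vertWhile tab joueur line p (numberToAlign - 1).toNat 1 1).2 ≠ numberToAlign := by
            intro he
            exact hw (hiff.1 (by omega))
          rw [if_neg hne, ih]
          by_cases hrest : ∃ x ∈ rest, AWin tab joueur numberToAlign line x
          · obtain ⟨q, hq, hA⟩ := hrest
            rw [if_pos ⟨q, hq, hA⟩, if_pos ⟨q, List.mem_cons_of_mem _ hq, hA⟩]
          · rw [if_neg hrest, if_neg (by
              rintro ⟨q, hq, hA⟩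
              rcases List.mem_cons.mp hq with rfl | hq'
              · exact hw hA.2
              · exact hrest ⟨q, hq', hA⟩)]
      · rw [if_neg hc, ih]
        by_cases hrest : ∃ x ∈ rest, AWin tab joueur numberToAlign line x
        · obtain ⟨q, hq, hA⟩ := hrest
          rw [if_pos ⟨q, hq, hA⟩, if_pos ⟨q, List.mem_cons_of_mem _ hq, hA⟩]
        · rw [if_neg hrest, if_neg (by
            rintro ⟨q, hq, hA⟩
            rcases List.mem_cons.mp hq with rfl | hq'
            · exact hc hA.1
            · exact hrest ⟨q, hq', hA⟩)]

lemma vertLines_spec (tab : List (List Int)) (joueur numberToAlign : Int) (places : List Int)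
    (hK : 1 ≤ numberToAlign) :
    ∀ lines : List Int,
      vertLines tab joueur numberToAlign places lines 1 1 =
        if ∃ l ∈ lines, ∃ p ∈ places, AWin tab joueur numberToAlign l p then some true
        else none := by
  intro lines
  induction lines with
  | nil => simp [vertLines]
  | cons line rest ih =>
      simp only [vertLines]
      rw [vertPlaces_spec tab joueur numberToAlign line hK places]
      by_cases hl : ∃ p ∈ places, AWin tab joueur numberToAlign line p
      · rw [if_pos hl, if_pos ⟨line, by simp, hl⟩]
      · rw [if_neg hl]
        simp only [ih]
        by_cases hrest : ∃ l ∈ rest, ∃ p ∈ places, AWin tab joueur numberToAlign l p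
        · obtain ⟨q, hq, hA⟩ := hrest
          rw [if_pos ⟨q, hq, hA⟩, if_pos ⟨q, List.mem_cons_of_mem _ hq, hA⟩]
        · rw [if_neg hrest, if_neg (by
            rintro ⟨q, hq, hA⟩
            rcases List.mem_cons.mp hq with rfl | hq'
            · exact hl hA
            · exact hrest ⟨q, hq', hA⟩)]

lemma bridgeA (tab : List (List Int)) (joueur numberToAlign : Int) (hK : 1 ≤ numberToAlign) :
    (∃ l ∈ PySem.List.pyRange 0 ((tab.length : Int) - numberToAlign + 1) 1,
        ∃ p ∈ PySem.List.pyRange 0 ((PySem.List.pyGetD tab 0 []).length : Int) 1,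
          AWin tab joueur numberToAlign l p) ↔ Win tab joueur numberToAlign := by
  constructor
  · rintro ⟨l, hl, p, hp, h1, h2⟩
    rw [PySem.List.mem_pyRange_one] at hl hp
    have hls : l = ((l.toNat : Nat) : Int) := (Int.toNat_of_nonneg hl.1).symm
    have hps : p = ((p.toNat : Nat) : Int) := (Int.toNat_of_nonneg hp.1).symm
    refine ⟨l.toNat, p.toNat, by omega, by omega, ?_⟩
    intro i hi
    cases i with
    | zero =>
        rw [hls, hps, cell_cast] at h1
        simpa using h1
    | succ d =>
        have h3 := h2 d (by omega)
        rw [hls, hps] at h3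
        rw [show ((l.toNat : Nat) : Int) + 1 + (d : Int) = ((l.toNat + (d + 1) : Nat) : Int) by
          push_cast; ring] at h3
        rw [cell_cast] at h3
        exact h3
  · rintro ⟨s, c, hc, hsk, hwin⟩
    refine ⟨(s : Int), by rw [PySem.List.mem_pyRange_one]; omega,
            (c : Int), by rw [PySem.List.mem_pyRange_one]; omega, ?_, ?_⟩
    · rw [cell_cast]
      simpa using hwin 0 (by omega)
    · intro d hd
      rw [show ((s : Nat) : Int) + 1 + (d : Int) = ((s + (d + 1) : Nat) : Int) by
        push_cast; ring]
      rw [cell_cast]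
      exact hwin (d + 1) (by omega)

lemma altColGo_spec (joueur numberToAlign : Int) (col : Int) (hK : 1 ≤ numberToAlign) :
    ∀ (rows : List (List Int)) (run : Nat),
      altColGo joueur numberToAlign col rows (run : Int) = true ↔
        ∃ s : Nat, s + numberToAlign.toNat ≤ run + rows.length ∧
          run < s + numberToAlign.toNat ∧
          ∀ i : Nat, s ≤ i → i < s + numberToAlign.toNat →
            (i < run ∨ PySem.List.pyGetD (rows.getD (i - run) []) col 0 = joueur) := by
  intro rows
  induction rows with
  | nil =>
      intro run
      simp only [altColGo, List.length_nil]
      constructor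
      · intro h; exact absurd h (by simp)
      · rintro ⟨s, h1, h2, _⟩; omega
  | cons row rest ih =>
      intro run
      simp only [altColGo, List.length_cons]
      by_cases hc : PySem.List.pyGetD row col 0 = joueur
      · rw [if_pos hc]
        by_cases hstop : numberToAlign ≤ (run : Int) + 1
        · rw [if_pos hstop]
          simp only [true_iff]
          refine ⟨run + 1 - numberToAlign.toNat, by omega, by omega, ?_⟩
          intro i h1 h2
          by_cases hir : i < run
          · exact Or.inl hir
          · have hi : i = run := by omega
            subst hi
            right
            simpa using hc
        · rw [if_neg hstop]
          have hcast := ih (run + 1)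
          push_cast at hcast
          rw [hcast]
          constructor
          · rintro ⟨s, h1, h2, h3⟩
            refine ⟨s, by omega, by omega, ?_⟩
            intro i hi1 hi2
            by_cases hir : i < run
            · exact Or.inl hir
            · by_cases hieq : i = run
              · subst hieq; right; simpa using hc
              · right
                rcases h3 i hi1 hi2 with h | h
                · exact absurd h (by omega)
                · rw [show i - run = (i - (run + 1)) + 1 from by omega]
                  simpa using h
          · rintro ⟨s, h1, h2, h3⟩
            have h2' : run + 1 < s + numberToAlign.toNat := by omega
            refine ⟨s, by omega, h2', ?_⟩
            intro i hi1 hi2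
            by_cases hir : i < run + 1
            · exact Or.inl hir
            · right
              rcases h3 i hi1 hi2 with h | h
              · exact absurd h (by omega)
              · rw [show i - run = (i - (run + 1)) + 1 from by omega] at h
                simpa using h
      · rw [if_neg hc]
        have hcast := ih 0
        push_cast at hcast
        rw [hcast]
        constructor
        · rintro ⟨s, h1, h2, h3⟩
          refine ⟨run + 1 + s, by omega, by omega, ?_⟩
          intro i hi1 hi2
          right
          have h := h3 (i - (run + 1)) (by omega) (by omega)
          rcases h with h | h
          · omega
          · rw [Nat.sub_zero] at h
            rw [show i - run = (i - (run + 1)) + 1 from by omega]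
            simpa using h
        · rintro ⟨s, h1, h2, h3⟩
          have hs : run + 1 ≤ s := by
            by_contra hsl
            have h := h3 run (by omega) (by omega)
            rcases h with h | h
            · omega
            · rw [Nat.sub_self] at h
              exact hc (by simpa using h)
          refine ⟨s - (run + 1), by omega, by omega, ?_⟩
          intro i hi1 hi2
          right
          rw [Nat.sub_zero]
          have h := h3 (i + run + 1) (by omega) (by omega)
          rcases h with h | h
          · omega
          · rw [show i + run + 1 - run = i + 1 from by omega] at h
            simpa using h

lemma bridgeB (tab : List (List Int)) (joueur numberToAlign : Int) (hK : 1 ≤ numberToAlign) :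
    ((PySem.List.pyRange 0 ((PySem.List.pyGetD tab 0 []).length : Int) 1).any
        (fun col => altColGo joueur numberToAlign col tab 0) = true) ↔
      Win tab joueur numberToAlign := by
  rw [List.any_eq_true]
  constructor
  · rintro ⟨col, hcol, hgo⟩
    rw [PySem.List.mem_pyRange_one] at hcol
    have hc0 : col = ((col.toNat : Nat) : Int) := (Int.toNat_of_nonneg hcol.1).symm
    rw [hc0] at hgo
    have hspec := altColGo_spec joueur numberToAlign ((col.toNat : Nat) : Int) hK tab 0
    push_cast at hspec
    rw [hspec] at hgo
    obtain ⟨s, h1, _, h3⟩ := hgo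
    refine ⟨s, col.toNat, by omega, by omega, ?_⟩
    intro i hi
    have h := h3 (s + i) (by omega) (by omega)
    rcases h with h | h
    · omega
    · rw [Nat.sub_zero, PySem.List.pyGetD_natCast] at h
      exact h
  · rintro ⟨s, c, hc, hsk, hwin⟩
    refine ⟨(c : Int), by rw [PySem.List.mem_pyRange_one]; omega, ?_⟩
    have hspec := altColGo_spec joueur numberToAlign ((c : Nat) : Int) hK tab 0
    push_cast at hspec
    rw [hspec]
    refine ⟨s, by omega, by omega, ?_⟩
    intro i hi1 hi2
    right
    rw [Nat.sub_zero, PySem.List.pyGetD_natCast]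
    have h := hwin (i - s) (by omega)
    rw [show s + (i - s) = i from by omega] at h
    exact h

-- ===== VERDICT (by name: the statement is the Claim_ definition above) =====
theorem verticale_spec : Claim_equal_verticale := by
  intro tab joueur numberToAlign _hdom hpre
  obtain ⟨_, hK, _⟩ := hpre
  unfold Spec_verticale
  have hA := vertLines_spec tab joueur numberToAlign
    (PySem.List.pyRange 0 ((PySem.List.pyGetD tab 0 []).length : Int) 1) hK
    (PySem.List.pyRange 0 ((tab.length : Int) - numberToAlign + 1) 1)
  simp only [verticale]
  rw [hA]
  unfold verticale_alt
  by_cases hw : Win tab joueur numberToAlign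
  · rw [if_pos ((bridgeA tab joueur numberToAlign hK).mpr hw),
        if_pos ((bridgeB tab joueur numberToAlign hK).mpr hw)]
  · rw [if_neg (fun h => hw ((bridgeA tab joueur numberToAlign hK).mp h)),
        if_neg (fun h => hw ((bridgeB tab joueur numberToAlign hK).mp h))]
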